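-- pv_equiv track=rewrite | github.com/Sarokiasamy2023/AIStoryGenerator | SalesforceAutomationRecorder/test_step_processor.py | find_matching_field
-- ===== SOURCE A (Python) =====
-- def find_matching_field(placeholder: str, headers: list) -> str:
--     """Find matching field header for a placeholder"""
--     placeholder_clean = placeholder.lower().strip()
--
--     # Exact match (case-insensitive)
--     for header in headers:
--         if header.lower().strip() == placeholder_clean:
--             return header
--
--     # Partial match - placeholder contained in header
--     for header in headers:
--         if placeholder_clean in header.lower():
--             return header
--
--     # Partial match - header contained in placeholder
--     for header in headers:
--         if header.lower().strip() in placeholder_clean: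
--             return header
--
--     return None
-- ===== SOURCE B (Python) =====
-- def find_matching_field(placeholder: str, headers: list) -> str:
--     """Single pass keeping the earliest header of the lowest match tier
--     (1 exact, 2 placeholder-in-header, 3 header-in-placeholder).
--     Tier 1 returns immediately; a test that cannot beat the current best is skipped."""
--     clean = placeholder.lower().strip()
--     best = None
--     best_t = 4
--     for header in headers:
--         hl = header.lower()
--         if hl.strip() == clean:
--             return header
--         if best_t > 2 and clean in hl:
--             best, best_t = header, 2
--         elif best_t > 3 and hl.strip() in clean:
--             best, best_t = header, 3
--     return best
-- ===== Notes on version B (the rewrite author's own statement) =====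
-- stated objective: alternative
-- what changed: Replaced A's three sequential scans of headers (exact, placeholder-in-header, header-in-placeholder) by a single pass that tags each header with a match tier (1/2/3), returns immediately on tier 1, and otherwise keeps the earliest header of the strictly lowest tier.
import Mathlib
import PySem

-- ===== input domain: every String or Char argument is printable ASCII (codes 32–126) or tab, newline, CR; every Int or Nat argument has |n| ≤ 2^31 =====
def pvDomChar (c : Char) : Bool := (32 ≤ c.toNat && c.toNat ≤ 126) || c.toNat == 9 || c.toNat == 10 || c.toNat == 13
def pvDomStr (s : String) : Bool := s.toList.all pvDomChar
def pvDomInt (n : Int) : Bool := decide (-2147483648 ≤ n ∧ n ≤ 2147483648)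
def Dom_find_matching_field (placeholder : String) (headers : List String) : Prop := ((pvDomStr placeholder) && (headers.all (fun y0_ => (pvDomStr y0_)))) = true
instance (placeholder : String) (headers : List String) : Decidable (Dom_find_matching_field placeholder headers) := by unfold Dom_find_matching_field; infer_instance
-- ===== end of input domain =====

-- B replaces A's three sequential scans by one pass keeping the earliest header of the lowest
-- match tier (alternative decomposition, same cost).


-- ===== PORT A =====
-- Three for-loops with early return, transliterated as three List.find? passes in order.
def find_matching_field (placeholder : String) (headers : List String) : Option String :=
  let placeholder_clean := PySem.Str.strip (PySem.Str.lower placeholder)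
  match headers.find? (fun header => PySem.Str.strip (PySem.Str.lower header) == placeholder_clean) with
  | some header => some header
  | none =>
    match headers.find? (fun header => PySem.Str.isIn placeholder_clean (PySem.Str.lower header)) with
    | some header => some header
    | none =>
      match headers.find? (fun header => PySem.Str.isIn (PySem.Str.strip (PySem.Str.lower header)) placeholder_clean) with
      | some header => some header
      | none => none

-- ===== PORT B =====
-- Source B's loop: return at once on an exact match; otherwise update (best, best_t) only via a
-- test that can still beat the current best tier (guards best_t > 2 / best_t > 3).
def fmfLoop (clean : String) (best : Option String) (best_t : Nat) : List String → Option String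
  | [] => best
  | header :: rest =>
    let hl := PySem.Str.lower header
    if PySem.Str.strip hl == clean then some header
    else if decide (best_t > 2) && PySem.Str.isIn clean hl then
      fmfLoop clean (some header) 2 rest
    else if decide (best_t > 3) && PySem.Str.isIn (PySem.Str.strip hl) clean then
      fmfLoop clean (some header) 3 rest
    else fmfLoop clean best best_t rest

def find_matching_field_alt (placeholder : String) (headers : List String) : Option String :=
  let clean := PySem.Str.strip (PySem.Str.lower placeholder)
  fmfLoop clean none 4 headers

-- ===== PRECONDITION & SPEC =====
def Spec_find_matching_field (placeholder : String) (headers : List String) (out : Option String) : Prop := out = find_matching_field_alt placeholder headers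
instance (placeholder : String) (headers : List String) (out : Option String) : Decidable (Spec_find_matching_field placeholder headers out) := by unfold Spec_find_matching_field; infer_instance

-- ===== CLAIM (what is proved, stated in full; the proofs are below) =====
def Claim_equal_find_matching_field : Prop := ∀ (placeholder : String) (headers : List String), Dom_find_matching_field placeholder headers → Spec_find_matching_field placeholder headers (find_matching_field placeholder headers)

-- ===== LEMMAS AND PROOFS =====

-- The match tier of a header: 1 exact, 2 placeholder-in-header, 3 header-in-placeholder.
def fmfTier (clean header : String) : Option Nat :=
  let hl := PySem.Str.lower header
  if PySem.Str.strip hl == clean then some 1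
  else if PySem.Str.isIn clean hl then some 2
  else if PySem.Str.isIn (PySem.Str.strip hl) clean then some 3
  else none

-- One fold step without early return or guard skipping: used to characterise fmfLoop.
def fmfStep (clean : String) (best : Option (Nat × String)) (header : String) : Option (Nat × String) :=
  match fmfTier clean header with
  | none => best
  | some t =>
    match best with
    | none => some (t, header)
    | some (bt, _) => if t < bt then some (t, header) else best


-- A's three-pass result, tagged with the tier it came from.
def fmfAMatch (clean : String) (l : List String) : Option (Nat × String) :=
  match l.find? (fun header => PySem.Str.strip (PySem.Str.lower header) == clean) with
  | some header => some (1, header)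
  | none =>
    match l.find? (fun header => PySem.Str.isIn clean (PySem.Str.lower header)) with
    | some header => some (2, header)
    | none =>
      match l.find? (fun header => PySem.Str.isIn (PySem.Str.strip (PySem.Str.lower header)) clean) with
      | some header => some (3, header)
      | none => none

-- Folding from an occupied accumulator = merge the accumulator with the fold from none.
theorem fmf_merge (c : String) (l : List String) : ∀ (bt : Nat) (bh : String),
    l.foldl (fmfStep c) (some (bt, bh)) =
      match l.foldl (fmfStep c) none with
      | none => some (bt, bh)
      | some (t, h) => if t < bt then some (t, h) else some (bt, bh) := by
  induction l with
  | nil => intro bt bh; simp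
  | cons x l ih =>
    intro bt bh
    simp only [List.foldl_cons]
    rcases ht : fmfTier c x with _ | t
    · simp only [fmfStep, ht]
      exact ih bt bh
    · simp only [fmfStep, ht]
      by_cases hlt : t < bt
      · simp only [if_pos hlt]
        rw [ih t x]
        rcases hfold : l.foldl (fmfStep c) none with _ | ⟨t', h'⟩
        · simp [hlt]
        · by_cases h1 : t' < t
          · simp [h1]
            intros
            omega
          · simp [h1, hlt]
      · simp only [if_neg hlt]
        rw [ih bt bh, ih t x]
        rcases hfold : l.foldl (fmfStep c) none with _ | ⟨t', h'⟩
        · simp [hlt]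
        · by_cases h1 : t' < t
          · simp [h1]
          · simp [h1, hlt]
            intros
            omega

-- Tier bounds on A's tagged result, used for the strict-improvement comparisons.
theorem fmfAMatch_ge1 (c : String) (l : List String) (t : Nat) (h : String)
    (hm : fmfAMatch c l = some (t, h)) : 1 ≤ t := by
  unfold fmfAMatch at hm
  repeat' split at hm
  all_goals simp_all
  all_goals omega

theorem fmfAMatch_ge2 (c : String) (l : List String) (t : Nat) (h : String)
    (hp1 : l.find? (fun header => PySem.Str.strip (PySem.Str.lower header) == c) = none)
    (hm : fmfAMatch c l = some (t, h)) : 2 ≤ t := by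
  unfold fmfAMatch at hm
  rw [hp1] at hm
  repeat' split at hm
  all_goals simp_all
  all_goals omega

theorem fmfAMatch_ge3 (c : String) (l : List String) (t : Nat) (h : String)
    (hp1 : l.find? (fun header => PySem.Str.strip (PySem.Str.lower header) == c) = none)
    (hp2 : l.find? (fun header => PySem.Str.isIn c (PySem.Str.lower header)) = none)
    (hm : fmfAMatch c l = some (t, h)) : 3 ≤ t := by
  unfold fmfAMatch at hm
  rw [hp1, hp2] at hm
  repeat' split at hm
  all_goals simp_all

-- The single pass computes exactly A's three-pass result (with its tier).
theorem fmf_main (c : String) (l : List String) :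
    l.foldl (fmfStep c) none = fmfAMatch c l := by
  induction l with
  | nil => simp [fmfAMatch]
  | cons x l ih =>
    rw [List.foldl_cons]
    by_cases h1 : (PySem.Str.strip (PySem.Str.lower x) == c) = true
    · have hstep : fmfStep c none x = some (1, x) := by simp_all [fmfStep, fmfTier]
      rw [hstep, fmf_merge, ih]
      conv_rhs => rw [fmfAMatch,
        List.find?_cons_of_pos (p := fun header => PySem.Str.strip (PySem.Str.lower header) == c) h1]
      rcases hA : fmfAMatch c l with _ | ⟨t, h⟩
      · rfl
      · dsimp only
        rw [if_neg (by have := fmfAMatch_ge1 c l t h hA; omega)]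
    · by_cases h2 : PySem.Str.isIn c (PySem.Str.lower x) = true
      · have hstep : fmfStep c none x = some (2, x) := by simp_all [fmfStep, fmfTier]
        rw [hstep, fmf_merge, ih]
        conv_rhs => rw [fmfAMatch,
          List.find?_cons_of_neg (p := fun header => PySem.Str.strip (PySem.Str.lower header) == c) h1,
          List.find?_cons_of_pos (p := fun header => PySem.Str.isIn c (PySem.Str.lower header)) h2]
        rcases hp1 : l.find? (fun header => PySem.Str.strip (PySem.Str.lower header) == c) with _ | h
        · rcases hA : fmfAMatch c l with _ | ⟨t, h⟩
          · rfl
          · dsimp only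
            rw [if_neg (by have := fmfAMatch_ge2 c l t h hp1 hA; omega)]
        · have hA : fmfAMatch c l = some (1, h) := by rw [fmfAMatch, hp1]
          rw [hA]
          dsimp only
          rw [if_pos (by omega)]
      · by_cases h3 : PySem.Str.isIn (PySem.Str.strip (PySem.Str.lower x)) c = true
        · have hstep : fmfStep c none x = some (3, x) := by simp_all [fmfStep, fmfTier]
          rw [hstep, fmf_merge, ih]
          conv_rhs => rw [fmfAMatch,
            List.find?_cons_of_neg (p := fun header => PySem.Str.strip (PySem.Str.lower header) == c) h1,
            List.find?_cons_of_neg (p := fun header => PySem.Str.isIn c (PySem.Str.lower header)) h2,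
            List.find?_cons_of_pos (p := fun header => PySem.Str.isIn (PySem.Str.strip (PySem.Str.lower header)) c) h3]
          rcases hp1 : l.find? (fun header => PySem.Str.strip (PySem.Str.lower header) == c) with _ | h
          · rcases hp2 : l.find? (fun header => PySem.Str.isIn c (PySem.Str.lower header)) with _ | h
            · rcases hA : fmfAMatch c l with _ | ⟨t, h⟩
              · rfl
              · dsimp only
                rw [if_neg (by have := fmfAMatch_ge3 c l t h hp1 hp2 hA; omega)]
            · have hA : fmfAMatch c l = some (2, h) := by rw [fmfAMatch, hp1, hp2]
              rw [hA]
              dsimp only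
              rw [if_pos (by omega)]
          · have hA : fmfAMatch c l = some (1, h) := by rw [fmfAMatch, hp1]
            rw [hA]
            dsimp only
            rw [if_pos (by omega)]
        · have hstep : fmfStep c none x = none := by simp_all [fmfStep, fmfTier]
          rw [hstep, ih]
          conv_rhs => rw [fmfAMatch,
            List.find?_cons_of_neg (p := fun header => PySem.Str.strip (PySem.Str.lower header) == c) h1,
            List.find?_cons_of_neg (p := fun header => PySem.Str.isIn c (PySem.Str.lower header)) h2,
            List.find?_cons_of_neg (p := fun header => PySem.Str.isIn (PySem.Str.strip (PySem.Str.lower header)) c) h3]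
          rw [fmfAMatch]

-- The fold never yields a tier-0 best (tiers are 1, 2, 3).
theorem fmf_fold_ge1 (c : String) (l : List String) (t : Nat) (h : String)
    (hm : l.foldl (fmfStep c) none = some (t, h)) : 1 ≤ t :=
  fmfAMatch_ge1 c l t h (by rw [← fmf_main]; exact hm)

-- B's guarded early-return loop computes the same best as the plain tier fold.
theorem fmfLoop_eq (c : String) : ∀ (l : List String) (best : Option String) (bt : Nat)
    (acc : Option (Nat × String)),
    ((best = none ∧ bt = 4 ∧ acc = none) ∨
      (∃ h, best = some h ∧ (bt = 2 ∨ bt = 3) ∧ acc = some (bt, h))) →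
    fmfLoop c best bt l =
      (match l.foldl (fmfStep c) acc with
       | some (_, h) => some h
       | none => none) := by
  intro l
  induction l with
  | nil =>
    intro best bt acc hrel
    rcases hrel with ⟨h1, _, h3⟩ | ⟨h, h1, _, h3⟩ <;> subst h1 <;> subst h3 <;> rfl
  | cons x l ih =>
    intro best bt acc hrel
    rw [List.foldl_cons]
    by_cases e1 : (PySem.Str.strip (PySem.Str.lower x) == c) = true
    · -- exact match: B returns x; the fold locks in tier 1
      have htier : fmfTier c x = some 1 := by simp [fmfTier, e1]
      have hstep : fmfStep c acc x = some (1, x) := by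
        rcases hrel with ⟨_, _, h3⟩ | ⟨h, _, hbt, h3⟩ <;> subst h3
        · simp [fmfStep, htier]
        · have : (1 : Nat) < bt := by omega
          simp [fmfStep, htier, this]
      have hloop : fmfLoop c best bt (x :: l) = some x := by
        rcases hrel with ⟨h1, h2, _⟩ | ⟨h, h1, hbt, _⟩ <;> subst h1 <;> simp [fmfLoop, e1]
      rw [hstep, hloop, fmf_merge]
      rcases hfold : l.foldl (fmfStep c) none with _ | ⟨t', h'⟩
      · rfl
      · have := fmf_fold_ge1 c l t' h' hfold
        dsimp only
        rw [if_neg (by omega)]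
    · by_cases e2 : PySem.Str.isIn c (PySem.Str.lower x) = true
      · simp only [PySem.Str.isIn_eq, PySem.Str.toList_lower] at e2
        have htier : fmfTier c x = some 2 := by simp [fmfTier, e1, e2]
        rcases hrel with ⟨h1, h2, h3⟩ | ⟨h, h1, hbt, h3⟩
        · subst h1; subst h2; subst h3
          rw [show fmfStep c none x = some (2, x) from by simp [fmfStep, htier],
            show fmfLoop c none 4 (x :: l) = fmfLoop c (some x) 2 l from by
              simp [fmfLoop, e1, e2]]
          exact ih (some x) 2 (some (2, x)) (Or.inr ⟨x, rfl, Or.inl rfl, rfl⟩)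
        · subst h1; subst h3
          rcases hbt with hbt | hbt <;> subst hbt
          · rw [show fmfStep c (some (2, h)) x = some (2, h) from by simp [fmfStep, htier],
              show fmfLoop c (some h) 2 (x :: l) = fmfLoop c (some h) 2 l from by
                simp [fmfLoop, e1]]
            exact ih (some h) 2 (some (2, h)) (Or.inr ⟨h, rfl, Or.inl rfl, rfl⟩)
          · rw [show fmfStep c (some (3, h)) x = some (2, x) from by simp [fmfStep, htier],
              show fmfLoop c (some h) 3 (x :: l) = fmfLoop c (some x) 2 l from by
                simp [fmfLoop, e1, e2]]
            exact ih (some x) 2 (some (2, x)) (Or.inr ⟨x, rfl, Or.inl rfl, rfl⟩)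
      · simp only [PySem.Str.isIn_eq, PySem.Str.toList_lower] at e2
        by_cases e3 : PySem.Str.isIn (PySem.Str.strip (PySem.Str.lower x)) c = true
        · simp only [PySem.Str.isIn_eq, PySem.Str.toList_lower, PySem.Str.toList_strip] at e3
          have htier : fmfTier c x = some 3 := by simp [fmfTier, e1, e2, e3]
          rcases hrel with ⟨h1, h2, h3⟩ | ⟨h, h1, hbt, h3⟩
          · subst h1; subst h2; subst h3
            rw [show fmfStep c none x = some (3, x) from by simp [fmfStep, htier],
              show fmfLoop c none 4 (x :: l) = fmfLoop c (some x) 3 l from by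
                simp [fmfLoop, e1, e2, e3]]
            exact ih (some x) 3 (some (3, x)) (Or.inr ⟨x, rfl, Or.inr rfl, rfl⟩)
          · subst h1; subst h3
            rcases hbt with hbt | hbt <;> subst hbt
            · rw [show fmfStep c (some (2, h)) x = some (2, h) from by simp [fmfStep, htier],
                show fmfLoop c (some h) 2 (x :: l) = fmfLoop c (some h) 2 l from by
                  simp [fmfLoop, e1]]
              exact ih (some h) 2 (some (2, h)) (Or.inr ⟨h, rfl, Or.inl rfl, rfl⟩)
            · rw [show fmfStep c (some (3, h)) x = some (3, h) from by simp [fmfStep, htier],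
                show fmfLoop c (some h) 3 (x :: l) = fmfLoop c (some h) 3 l from by
                  simp [fmfLoop, e1, e2]]
              exact ih (some h) 3 (some (3, h)) (Or.inr ⟨h, rfl, Or.inr rfl, rfl⟩)
        · simp only [PySem.Str.isIn_eq, PySem.Str.toList_lower, PySem.Str.toList_strip] at e3
          have htier : fmfTier c x = none := by simp [fmfTier, e1, e2, e3]
          have hloop : fmfLoop c best bt (x :: l) = fmfLoop c best bt l := by
            simp [fmfLoop, e1, e2, e3]
          rw [show fmfStep c acc x = acc from by simp [fmfStep, htier], hloop]
          exact ih best bt acc hrel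

-- ===== VERDICT (by name: the statement is the Claim_ definition above) =====
theorem find_matching_field_spec : Claim_equal_find_matching_field := by
  intro placeholder headers _
  show find_matching_field placeholder headers = find_matching_field_alt placeholder headers
  dsimp only [find_matching_field, find_matching_field_alt]
  rw [fmfLoop_eq (PySem.Str.strip (PySem.Str.lower placeholder)) headers none 4 none
      (Or.inl ⟨rfl, rfl, rfl⟩), fmf_main, fmfAMatch]
  rcases headers.find? _ with _ | h
  · rcases headers.find? _ with _ | h
    · rcases headers.find? _ with _ | h <;> rfl
    · rfl
  · rfl
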